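-- pv_equiv track=rewrite | github.com/Amitreddy14/Gestroll | app.py | display_selection_mode
-- ===== SOURCE A (Python) =====
-- selection_modes = {
--     "select": 0,
--     "drawing": 1,
--     "effect": 2,
--     "segmentation": 3,
--     "panoroma": 4,
--     "tunnel": 5,
-- }
--
-- def display_selection_mode(selection_mode, display_text):
--     for a_key in selection_modes:
--         if (selection_mode == selection_modes["select"]):
--             display_text += "1. drawing\n2. graphic effects\n3. segmentation\n4. panaroma\n5. light tunnel\n"
--             break
--         elif (selection_mode == selection_modes["effect"]):
--             text = "1. mural\n2. cartoon\n3. point art\n4. avatar\n"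
--             display_text = text + display_text
--             break
--         elif selection_mode == selection_modes[a_key]:
--             text = a_key + "\n"
--             display_text = text + display_text
--             break
--     return display_text
-- ===== SOURCE B (Python) =====
-- selection_modes = {
--     "select": 0,
--     "drawing": 1,
--     "effect": 2,
--     "segmentation": 3,
--     "panoroma": 4,
--     "tunnel": 5,
-- }
--
-- # Branch-free: the result is always prefix + display_text + suffix,
-- # with prefix/suffix drawn from two static tables (empty when absent).
-- _PREFIXES = {
--     selection_modes["drawing"]: "drawing\n",
--     selection_modes["effect"]: "1. mural\n2. cartoon\n3. point art\n4. avatar\n",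
--     selection_modes["segmentation"]: "segmentation\n",
--     selection_modes["panoroma"]: "panoroma\n",
--     selection_modes["tunnel"]: "tunnel\n",
-- }
-- _SUFFIXES = {
--     selection_modes["select"]: "1. drawing\n2. graphic effects\n3. segmentation\n4. panaroma\n5. light tunnel\n",
-- }
--
-- def display_selection_mode(selection_mode, display_text):
--     return _PREFIXES.get(selection_mode, "") + display_text + _SUFFIXES.get(selection_mode, "")
-- ===== Notes on version B (the rewrite author's own statement) =====
-- stated objective: simpler
-- what changed: Replaces A's key-scan loop with break and three-way branch chain by a branch-free formulation: the result is always prefix + display_text + suffix, with prefix and suffix looked up (defaulting to empty) in two static tables built once.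
import Mathlib
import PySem

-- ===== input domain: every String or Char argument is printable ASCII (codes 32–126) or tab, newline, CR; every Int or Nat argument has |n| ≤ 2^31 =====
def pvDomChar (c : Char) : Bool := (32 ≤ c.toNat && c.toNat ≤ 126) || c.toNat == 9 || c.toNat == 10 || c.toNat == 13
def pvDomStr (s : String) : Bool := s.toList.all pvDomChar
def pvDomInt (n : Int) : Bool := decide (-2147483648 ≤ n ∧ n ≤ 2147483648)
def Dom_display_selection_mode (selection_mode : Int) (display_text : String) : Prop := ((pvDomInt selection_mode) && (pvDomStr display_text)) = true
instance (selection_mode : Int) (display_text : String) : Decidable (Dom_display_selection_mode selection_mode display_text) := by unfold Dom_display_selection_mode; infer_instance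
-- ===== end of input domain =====

-- B replaces A's key-scan loop and branch chain by the branch-free form prefix ++ text ++ suffix with two static tables; simpler, same behaviour.
-- ===== PORT A =====
def selModes : PySem.Dict String Int :=
  PySem.Dict.ofList [("select", 0), ("drawing", 1), ("effect", 2), ("segmentation", 3), ("panoroma", 4), ("tunnel", 5)]

-- the for-loop over the dict's keys, with break modelled by returning
def dsmLoop (selection_mode : Int) (display_text : String) : List String → String
  | [] => display_text
  | a_key :: rest =>
    if selection_mode = (selModes.getD "select" 0) then
      display_text ++ "1. drawing\n2. graphic effects\n3. segmentation\n4. panaroma\n5. light tunnel\n"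
    else if selection_mode = (selModes.getD "effect" 0) then
      "1. mural\n2. cartoon\n3. point art\n4. avatar\n" ++ display_text
    else if selection_mode = (selModes.getD a_key 0) then
      (a_key ++ "\n") ++ display_text
    else dsmLoop selection_mode display_text rest

def display_selection_mode (selection_mode : Int) (display_text : String) : String :=
  dsmLoop selection_mode display_text (selModes.keys)

-- ===== PORT B =====
def dsmPrefixes : PySem.Dict Int String :=
  PySem.Dict.ofList
    [ (selModes.getD "drawing" 0, "drawing\n")
    , (selModes.getD "effect" 0, "1. mural\n2. cartoon\n3. point art\n4. avatar\n")
    , (selModes.getD "segmentation" 0, "segmentation\n")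
    , (selModes.getD "panoroma" 0, "panoroma\n")
    , (selModes.getD "tunnel" 0, "tunnel\n") ]

def dsmSuffixes : PySem.Dict Int String :=
  PySem.Dict.ofList
    [ (selModes.getD "select" 0, "1. drawing\n2. graphic effects\n3. segmentation\n4. panaroma\n5. light tunnel\n") ]

def display_selection_mode_alt (selection_mode : Int) (display_text : String) : String :=
  dsmPrefixes.getD selection_mode "" ++ display_text ++ dsmSuffixes.getD selection_mode ""

-- ===== PRECONDITION & SPEC =====
def Spec_display_selection_mode (selection_mode : Int) (display_text : String) (out : String) : Prop := out = display_selection_mode_alt selection_mode display_text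
instance (selection_mode : Int) (display_text : String) (out : String) : Decidable (Spec_display_selection_mode selection_mode display_text out) := by unfold Spec_display_selection_mode; infer_instance

-- ===== CLAIM (what is proved, stated in full; the proofs are below) =====
def Claim_equal_display_selection_mode : Prop := ∀ (selection_mode : Int) (display_text : String), Dom_display_selection_mode selection_mode display_text → Spec_display_selection_mode selection_mode display_text (display_selection_mode selection_mode display_text)

-- ===== LEMMAS AND PROOFS =====

-- ===== VERDICT (by name: the statement is the Claim_ definition above) =====
theorem display_selection_mode_spec : Claim_equal_display_selection_mode := by
  intro m t _
  unfold Spec_display_selection_mode display_selection_mode display_selection_mode_alt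
  by_cases h0 : m = 0
  · simp [dsmLoop, selModes, dsmPrefixes, dsmSuffixes, PySem.Dict.ofList, PySem.Dict.update, PySem.Dict.insert, PySem.Dict.empty, PySem.Dict.contains, PySem.Dict.getD, PySem.Dict.get?, PySem.Dict.keys, h0]
  by_cases h2 : m = 2
  · simp [dsmLoop, selModes, dsmPrefixes, dsmSuffixes, PySem.Dict.ofList, PySem.Dict.update, PySem.Dict.insert, PySem.Dict.empty, PySem.Dict.contains, PySem.Dict.getD, PySem.Dict.get?, PySem.Dict.keys, h0, h2]
  by_cases h1 : m = 1
  · simp [dsmLoop, selModes, dsmPrefixes, dsmSuffixes, PySem.Dict.ofList, PySem.Dict.update, PySem.Dict.insert, PySem.Dict.empty, PySem.Dict.contains, PySem.Dict.getD, PySem.Dict.get?, PySem.Dict.keys, h0, h1, h2]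
  by_cases h3 : m = 3
  · simp [dsmLoop, selModes, dsmPrefixes, dsmSuffixes, PySem.Dict.ofList, PySem.Dict.update, PySem.Dict.insert, PySem.Dict.empty, PySem.Dict.contains, PySem.Dict.getD, PySem.Dict.get?, PySem.Dict.keys, h0, h1, h2, h3]
  by_cases h4 : m = 4
  · simp [dsmLoop, selModes, dsmPrefixes, dsmSuffixes, PySem.Dict.ofList, PySem.Dict.update, PySem.Dict.insert, PySem.Dict.empty, PySem.Dict.contains, PySem.Dict.getD, PySem.Dict.get?, PySem.Dict.keys, h0, h1, h2, h3, h4]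
  by_cases h5 : m = 5
  · simp [dsmLoop, selModes, dsmPrefixes, dsmSuffixes, PySem.Dict.ofList, PySem.Dict.update, PySem.Dict.insert, PySem.Dict.empty, PySem.Dict.contains, PySem.Dict.getD, PySem.Dict.get?, PySem.Dict.keys, h0, h1, h2, h3, h4, h5]
  · have e0 : (((0:Int) == m) = false) := by simp; omega
    have e1 : (((1:Int) == m) = false) := by simp; omega
    have e2 : (((2:Int) == m) = false) := by simp; omega
    have e3 : (((3:Int) == m) = false) := by simp; omega
    have e4 : (((4:Int) == m) = false) := by simp; omega
    have e5 : (((5:Int) == m) = false) := by simp; omega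
    simp [dsmLoop, selModes, dsmPrefixes, dsmSuffixes, PySem.Dict.ofList, PySem.Dict.update, PySem.Dict.insert,
      PySem.Dict.empty, PySem.Dict.contains, PySem.Dict.getD, PySem.Dict.get?, PySem.Dict.keys,
      List.find?, h0, h1, h2, h3, h4, h5, e0, e1, e2, e3, e4, e5]
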